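-- pv_equiv track=rewrite | github.com/andyhsi2023-cq/sweet-trap-paper1 | 03-analysis/part3-molecular/scripts/23_pfam_jaccard_null.py | extract_pfam_set
-- ===== SOURCE A (Python) =====
-- def extract_pfam_set(domain_arch: str) -> set[str]:
--     """Parse strings like 'ANF_receptor(PF01094);NCD3G(PF07562);7tm_3(PF00003)'."""
--     out = set()
--     if not domain_arch or domain_arch == "NA":
--         return out
--     for token in domain_arch.split(";"):
--         token = token.strip()
--         # extract the PFxxxxx accession inside parentheses
--         l = token.find("(")
--         r = token.find(")")
--         if 0 <= l < r:
--             acc = token[l + 1 : r].strip()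
--             if acc.startswith("PF"):
--                 out.add(acc)
--     return out
-- ===== SOURCE B (Python) =====
-- def extract_pfam_set(domain_arch: str) -> set[str]:
--     """Parse strings like 'ANF_receptor(PF01094);NCD3G(PF07562);7tm_3(PF00003)'.
--
--     Single left-to-right pass: a small state machine over the characters,
--     with no split/strip/find passes or intermediate token lists.
--     """
--     out = set()
--     acc = None      # None: still before the first paren of this token; else: chars captured after '('
--     dead = False    # this token already finished (or failed): ignore until the next ';'
--     for ch in domain_arch:
--         if ch == ';':
--             acc = None
--             dead = False
--         elif dead:
--             pass
--         elif acc is None: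
--             if ch == '(':
--                 acc = []
--             elif ch == ')':
--                 dead = True
--         elif ch == ')':
--             s = ''.join(acc).strip()
--             if s.startswith('PF'):
--                 out.add(s)
--             acc = None
--             dead = True
--         else:
--             acc.append(ch)
--     return out
-- ===== Notes on version B (the rewrite author's own statement) =====
-- stated objective: alternative
-- what changed: A splits the string into tokens and re-scans each token several times (strip, two find calls, a slice, another strip); B makes a single left-to-right pass over the characters with a small state machine (a capture buffer plus a dead flag) and builds no token lists.
import Mathlib
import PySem

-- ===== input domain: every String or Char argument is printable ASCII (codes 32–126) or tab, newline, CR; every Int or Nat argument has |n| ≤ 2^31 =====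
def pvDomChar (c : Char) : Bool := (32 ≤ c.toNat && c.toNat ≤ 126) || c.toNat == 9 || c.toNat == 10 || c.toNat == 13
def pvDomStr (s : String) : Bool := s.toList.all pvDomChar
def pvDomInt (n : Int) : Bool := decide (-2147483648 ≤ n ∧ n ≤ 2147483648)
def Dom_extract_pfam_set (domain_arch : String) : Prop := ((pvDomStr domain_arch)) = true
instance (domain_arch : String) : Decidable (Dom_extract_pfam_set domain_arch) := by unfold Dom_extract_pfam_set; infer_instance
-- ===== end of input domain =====

-- B replaces A's split/strip/find token pipeline by one left-to-right state-machine pass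
-- over the characters (objective: alternative single-pass algorithm).

-- ===== PORT A =====
-- A: guard for ""/"NA", split on ';', per token strip then find('(')/find(')'),
-- slice between them, strip the slice, keep it iff it starts with "PF"; result is a Python set.
def extract_pfam_set (domain_arch : String) : List String :=
  let out : PySem.Set String := PySem.Set.empty
  if domain_arch.toList = [] ∨ domain_arch.toList = ['N', 'A'] then out
  else
    (PySem.Chars.splitOn domain_arch.toList [';']).foldl (fun out token =>
      let token := PySem.Chars.strip token
      let l := PySem.Chars.find token ['(']
      let r := PySem.Chars.find token [')']
      if 0 ≤ l ∧ l < r then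
        let acc := PySem.Chars.strip (PySem.List.slice token (some (l + 1)) (some r))
        if PySem.Chars.startswith acc ['P', 'F'] then PySem.Set.add out (String.mk acc)
        else out
      else out) out

-- ===== PORT B =====
-- B: one pass; state = (acc: chars captured after '(' of the current token, if any;
-- dead: the current token is already decided, skip until the next ';').
def pfamScan : List Char → Option (List Char) → Bool → PySem.Set String → PySem.Set String
  | [], _, _, out => out
  | c :: rest, acc, dead, out =>
    if c = ';' then pfamScan rest none false out
    else if dead then pfamScan rest acc dead out
    else
      match acc with
      | none =>
        if c = '(' then pfamScan rest (some []) false out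
        else if c = ')' then pfamScan rest none true out
        else pfamScan rest none false out
      | some buf =>
        if c = ')' then
          let s := PySem.Chars.strip buf
          let out := if PySem.Chars.startswith s ['P', 'F'] then PySem.Set.add out (String.mk s) else out
          pfamScan rest none true out
        else pfamScan rest (some (buf ++ [c])) false out

def extract_pfam_set_alt (domain_arch : String) : List String :=
  pfamScan domain_arch.toList none false PySem.Set.empty

-- ===== PRECONDITION & SPEC =====
def Spec_extract_pfam_set (domain_arch : String) (out : List String) : Prop := out = extract_pfam_set_alt domain_arch
instance (domain_arch : String) (out : List String) : Decidable (Spec_extract_pfam_set domain_arch out) := by unfold Spec_extract_pfam_set; infer_instance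

-- ===== CLAIM (what is proved, stated in full; the proofs are below) =====
def Claim_equal_extract_pfam_set : Prop := ∀ (domain_arch : String), Dom_extract_pfam_set domain_arch → Spec_extract_pfam_set domain_arch (extract_pfam_set domain_arch)

-- ===== LEMMAS AND PROOFS =====

-- a character that ends the "before '('" scan of a token
def isParen (c : Char) : Bool := decide (c = '(') || decide (c = ')')

-- the raw accession candidate of one token (chars between the first '(' and the
-- first ')', provided the first paren of the token is '('), if any
def inner? (t : List Char) : Option (List Char) :=
  match t.dropWhile (fun c => !isParen c) with
  | d :: v => if d = '(' then (if ')' ∈ v then some (v.takeWhile (· ≠ ')')) else none) else none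
  | [] => none

-- finishing one captured buffer, exactly as both programs do
def finish (out : PySem.Set String) (buf : List Char) : PySem.Set String :=
  let s := PySem.Chars.strip buf
  if PySem.Chars.startswith s ['P', 'F'] then PySem.Set.add out (String.mk s) else out

-- the per-token effect both programs have
def tokO (out : PySem.Set String) (t : List Char) : PySem.Set String :=
  match inner? t with
  | some buf => finish out buf
  | none => out

-- reference splitter: Python's split(";") on the character list
def splitSemi : List Char → List (List Char)
  | [] => [[]]
  | c :: rest =>
    if c = ';' then [] :: splitSemi rest
    else
      match splitSemi rest with
      | t :: ts => (c :: t) :: ts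
      | [] => [[c]]

def headCons (x : List Char) : List (List Char) → List (List Char)
  | t :: ts => (x ++ t) :: ts
  | [] => [x]

theorem cons_assoc1 (q s t : List Char) (a : Char) :
    q ++ a :: (s ++ t) = (q ++ a :: s) ++ t := by simp

theorem cons_assoc2 (q X : List Char) (a : Char) :
    q ++ a :: X = (q ++ [a]) ++ X := by simp

theorem splitSemi_ne_nil (cs : List Char) : splitSemi cs ≠ [] := by
  cases cs with
  | nil => simp [splitSemi]
  | cons c rest =>
    simp only [splitSemi]
    split
    · simp
    · split <;> simp

theorem headCons_nil {ss : List (List Char)} (h : ss ≠ []) : headCons [] ss = ss := by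
  cases ss with
  | nil => exact absurd rfl h
  | cons t ts => simp [headCons]

theorem isspace_not_paren {x : Char} (h : PySem.Chars.isspace x = true) : isParen x = false := by
  by_contra hb
  rw [Bool.not_eq_false, isParen, Bool.or_eq_true, decide_eq_true_eq, decide_eq_true_eq] at hb
  rcases hb with rfl | rfl <;> exact absurd h (by decide)

theorem find_none {u : List Char} {c : Char} (h : c ∉ u) : PySem.Chars.find u [c] = -1 := by
  rw [PySem.Chars.find_eq_neg_one_iff]
  rintro ⟨s, t, rfl⟩
  exact h (by simp)

theorem find_of_split {u p t : List Char} {c : Char} (hu : u = p ++ c :: t) (hp : c ∉ p) :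
    PySem.Chars.find u [c] = (p.length : Int) := by
  have hinf : [c] <:+: u := ⟨p, t, by simp [hu]⟩
  have h0 : 0 ≤ PySem.Chars.find u [c] := (PySem.Chars.find_nonneg_iff u [c]).mpr hinf
  obtain ⟨hpre, hmin⟩ := PySem.Chars.find_spec h0
  set n := (PySem.Chars.find u [c]).toNat with hn
  have hle : n ≤ p.length := by
    by_contra hl
    exact hmin p.length (by omega) (by rw [hu, List.drop_left]; exact ⟨t, rfl⟩)
  have hge : p.length ≤ n := by
    by_contra hl
    have hl' : n < p.length := by omega
    obtain ⟨w, hw⟩ := hpre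
    have hc : u[n]? = some c := by
      rw [← List.head?_drop, ← hw]; rfl
    rw [hu] at hc
    rw [List.getElem?_append_left hl'] at hc
    exact hp (List.mem_of_getElem? hc)
  omega

theorem split_at_first {c : Char} {w : List Char} (h : c ∈ w) :
    w = w.takeWhile (· ≠ c) ++ c :: (w.dropWhile (· ≠ c)).tail ∧ c ∉ w.takeWhile (· ≠ c) := by
  induction w with
  | nil => cases h
  | cons a w' ih =>
    by_cases hac : a = c
    · subst hac
      constructor
      · simp [List.takeWhile_cons, List.dropWhile_cons]
      · simp [List.takeWhile_cons]
    · have h' : c ∈ w' := by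
        rcases List.mem_cons.mp h with h1 | h1
        · exact absurd h1.symm hac
        · exact h1
      obtain ⟨ih1, ih2⟩ := ih h'
      have hd : (decide (a ≠ c)) = true := by simp [hac]
      constructor
      · rw [List.takeWhile_cons, List.dropWhile_cons, hd]
        simp only [if_true]
        rw [List.cons_append]
        exact congrArg (a :: ·) ih1
      · rw [List.takeWhile_cons, hd]
        simp only [if_true]
        intro hm
        rcases List.mem_cons.mp hm with h1 | h1
        · exact hac h1.symm
        · exact ih2 h1

theorem dropWhile_decomp {p : Char → Bool} {w : List Char} {c : Char} {v : List Char}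
    (h : w.dropWhile p = c :: v) :
    w = w.takeWhile p ++ c :: v ∧ p c = false := by
  induction w with
  | nil => simp at h
  | cons a w' ih =>
    rw [List.dropWhile_cons] at h
    by_cases hpa : p a = true
    · rw [if_pos hpa] at h
      obtain ⟨ih1, ih2⟩ := ih h
      refine ⟨?_, ih2⟩
      rw [List.takeWhile_cons, if_pos hpa, List.cons_append]
      exact congrArg (a :: ·) ih1
    · rw [if_neg hpa] at h
      injection h with h1 h2
      subst h1
      subst h2
      refine ⟨?_, Bool.not_eq_true _ ▸ hpa⟩
      rw [List.takeWhile_cons, if_neg hpa]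
      rfl

theorem inner?_cons_skip {c : Char} (hc : isParen c = false) (v : List Char) :
    inner? (c :: v) = inner? v := by
  simp [inner?, List.dropWhile_cons, hc]

theorem inner?_cons_close (v : List Char) : inner? (')' :: v) = none := rfl

theorem inner?_cons_open (v : List Char) :
    inner? ('(' :: v) = if ')' ∈ v then some (v.takeWhile (· ≠ ')')) else none := rfl

theorem inner?_all_nonparen {z : List Char} (hz : ∀ x ∈ z, isParen x = false) : inner? z = none := by
  unfold inner?
  rw [List.dropWhile_eq_nil_iff.mpr (by intro x hx; simp [hz x hx])]

theorem inner?_append (w z : List Char) (hz : ∀ x ∈ z, isParen x = false) :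
    inner? (w ++ z) = inner? w := by
  induction w with
  | nil =>
    rw [List.nil_append]
    rw [inner?_all_nonparen hz]
    rfl
  | cons c w' ih =>
    have hzr : ')' ∉ z := fun hm => absurd (hz _ hm) (by decide)
    by_cases hp : isParen c = true
    · have hcp : c = '(' ∨ c = ')' := by
        rw [isParen, Bool.or_eq_true, decide_eq_true_eq, decide_eq_true_eq] at hp
        exact hp
      rcases hcp with rfl | rfl
      · rw [List.cons_append, inner?_cons_open, inner?_cons_open]
        by_cases hr : ')' ∈ w'
        · rw [if_pos (by simp [List.mem_append, hr]), if_pos hr]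
          congr 1
          rw [List.takeWhile_append]
          rw [if_neg ?hlen]
          case hlen =>
            intro hlen
            have hpre : w'.takeWhile (· ≠ ')') <+: w' := List.takeWhile_prefix _
            have heq : w'.takeWhile (· ≠ ')') = w' := hpre.eq_of_length hlen
            have := List.mem_takeWhile_imp (p := (· ≠ ')')) (heq ▸ hr)
            simp at this
        · rw [if_neg (by simp [List.mem_append, hr, hzr]), if_neg hr]
      · rw [List.cons_append, inner?_cons_close, inner?_cons_close]
    · have hp' : isParen c = false := by simpa using hp
      rw [List.cons_append, inner?_cons_skip hp', inner?_cons_skip hp']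
      exact ih

theorem inner?_lstrip (t : List Char) :
    inner? (t.dropWhile PySem.Chars.isspace) = inner? t := by
  induction t with
  | nil => rfl
  | cons c t' ih =>
    rw [List.dropWhile_cons]
    by_cases hs : PySem.Chars.isspace c = true
    · rw [if_pos hs, ih, inner?_cons_skip (isspace_not_paren hs)]
    · rw [if_neg hs]

theorem rstrip_decomp (w : List Char) :
    ∃ z, w = PySem.Chars.rstrip w ++ z ∧ ∀ x ∈ z, PySem.Chars.isspace x = true := by
  refine ⟨(w.reverse.takeWhile PySem.Chars.isspace).reverse, ?_, ?_⟩
  · conv_lhs => rw [← List.reverse_reverse w,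
      ← List.takeWhile_append_dropWhile (p := PySem.Chars.isspace) (l := w.reverse)]
    rw [List.reverse_append]
    rfl
  · intro x hx
    rw [List.mem_reverse] at hx
    exact List.mem_takeWhile_imp hx

theorem inner?_strip (t : List Char) : inner? (PySem.Chars.strip t) = inner? t := by
  obtain ⟨z, hz1, hz2⟩ := rstrip_decomp (PySem.Chars.lstrip t)
  have h1 : inner? (PySem.Chars.rstrip (PySem.Chars.lstrip t)) = inner? (PySem.Chars.lstrip t) := by
    conv_rhs => rw [hz1]
    exact (inner?_append _ _ (fun x hx => isspace_not_paren (hz2 x hx))).symm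
  have h2 : inner? (PySem.Chars.lstrip t) = inner? t := inner?_lstrip t
  rw [PySem.Chars.strip, h1, h2]

-- A's per-token inner extraction (on any token) is inner?
theorem innerA_eq (u : List Char) :
    (if 0 ≤ PySem.Chars.find u ['('] ∧ PySem.Chars.find u ['('] < PySem.Chars.find u [')'] then
       some (PySem.List.slice u (some (PySem.Chars.find u ['('] + 1)) (some (PySem.Chars.find u [')'])))
     else none) = inner? u := by
  cases hd : u.dropWhile (fun c => !isParen c) with
  | nil =>
    have hall : ∀ x ∈ u, isParen x = false := by
      intro x hx
      have := (List.dropWhile_eq_nil_iff.mp hd) x hx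
      simpa using this
    have hno : '(' ∉ u := fun hmem => absurd (hall _ hmem) (by decide)
    rw [find_none hno, if_neg (by rintro ⟨h1, -⟩; exact absurd h1 (by decide))]
    rw [inner?_all_nonparen hall]
  | cons c v =>
    obtain ⟨hu, hpc⟩ := dropWhile_decomp hd
    have hq : ∀ x ∈ u.takeWhile (fun c => !isParen c), isParen x = false := by
      intro x hx
      simpa using List.mem_takeWhile_imp hx
    have hqo : '(' ∉ u.takeWhile (fun c => !isParen c) :=
      fun hm => absurd (hq _ hm) (by decide)
    have hqc : ')' ∉ u.takeWhile (fun c => !isParen c) :=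
      fun hm => absurd (hq _ hm) (by decide)
    have hcp : c = '(' ∨ c = ')' := by
      have hc' : isParen c = true := by simpa using hpc
      rw [isParen, Bool.or_eq_true, decide_eq_true_eq, decide_eq_true_eq] at hc'
      exact hc'
    have hinner : inner? u = if c = '(' then (if ')' ∈ v then some (v.takeWhile (· ≠ ')')) else none) else none := by
      unfold inner?
      rw [hd]
    rcases hcp with rfl | rfl
    · have hl : PySem.Chars.find u ['('] = ((u.takeWhile (fun c => !isParen c)).length : Int) :=
        find_of_split hu hqo
      by_cases hrv : ')' ∈ v
      · obtain ⟨hvsplit, hv1⟩ := split_at_first hrv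
        have hu3 : u = ((u.takeWhile (fun c => !isParen c)) ++ ['(']) ++
            ((v.takeWhile (· ≠ ')')) ++ ')' :: (v.dropWhile (· ≠ ')')).tail) := by
          conv_lhs => rw [hu, hvsplit]
          exact cons_assoc2 _ _ _
        have hnc : ')' ∉ (u.takeWhile (fun c => !isParen c)) ++ '(' :: (v.takeWhile (· ≠ ')')) := by
          intro hm
          rcases List.mem_append.mp hm with h1 | h1
          · exact hqc h1
          · rcases List.mem_cons.mp h1 with h1 | h1
            · exact absurd h1 (by decide)
            · exact hv1 h1
        have hu3' : u = ((u.takeWhile (fun c => !isParen c)) ++ '(' :: (v.takeWhile (· ≠ ')'))) ++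
            ')' :: (v.dropWhile (· ≠ ')')).tail := by
          conv_lhs => rw [hu3]
          simp only [List.append_assoc, List.cons_append, List.singleton_append, List.nil_append]
        have hr : PySem.Chars.find u [')'] =
            (((u.takeWhile (fun c => !isParen c)) ++ '(' :: (v.takeWhile (· ≠ ')'))).length : Int) :=
          find_of_split hu3' hnc
        rw [hl, hr, if_pos (by
          constructor
          · exact Int.natCast_nonneg _
          · push_cast [List.length_append, List.length_cons]
            omega)]
        rw [hinner, if_pos rfl, if_pos hrv]
        congr 1
        have hcast : ((u.takeWhile (fun c => !isParen c)).length : Int) + 1 =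
            (((u.takeWhile (fun c => !isParen c)).length + 1 : Nat) : Int) := by push_cast; ring
        rw [hcast, PySem.List.slice_natCast]
        have hlen2 : ((u.takeWhile (fun c => !isParen c)) ++ '(' :: (v.takeWhile (· ≠ ')'))).length
            = ((u.takeWhile (fun c => !isParen c)).length + 1) + (v.takeWhile (· ≠ ')')).length := by
          rw [List.length_append, List.length_cons]
          omega
        have hql : ((u.takeWhile (fun c => !isParen c)) ++ ['(']).length
            = (u.takeWhile (fun c => !isParen c)).length + 1 := by simp
        have hdrop := congrArg
          (fun w => List.drop ((u.takeWhile (fun c => !isParen c)).length + 1) w) hu3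
        simp only [] at hdrop
        rw [← hql] at hdrop
        rw [List.drop_left] at hdrop
        rw [hlen2]
        have hsub : (((u.takeWhile (fun c => !isParen c)).length + 1) + (v.takeWhile (· ≠ ')')).length)
            - ((u.takeWhile (fun c => !isParen c)).length + 1) = (v.takeWhile (· ≠ ')')).length := by omega
        rw [hsub, ← hql, hdrop]
        exact List.take_left
      · have hnr : ')' ∉ u := by
          intro hm
          rw [hu] at hm
          rcases List.mem_append.mp hm with h1 | h1
          · exact hqc h1
          · rcases List.mem_cons.mp h1 with h1 | h1
            · exact absurd h1 (by decide)
            · exact hrv h1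
        rw [find_none hnr, hl, if_neg (by rintro ⟨-, h2⟩; omega)]
        rw [hinner, if_pos rfl, if_neg hrv]
    · have hr : PySem.Chars.find u [')'] = ((u.takeWhile (fun c => !isParen c)).length : Int) :=
        find_of_split hu hqc
      have hcond : ¬(0 ≤ PySem.Chars.find u ['('] ∧
          PySem.Chars.find u ['('] < PySem.Chars.find u [')']) := by
        rintro ⟨h1, h2⟩
        rw [hr] at h2
        by_cases hlm : '(' ∈ u
        · have hlv : '(' ∈ v := by
            rcases List.mem_append.mp (hu ▸ hlm) with h3 | h3
            · exact absurd (hq _ h3) (by decide)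
            · rcases List.mem_cons.mp h3 with h3 | h3
              · exact absurd h3 (by decide)
              · exact h3
          obtain ⟨hwsplit, hw1⟩ := split_at_first hlv
          have hu4 : u = ((u.takeWhile (fun c => !isParen c)) ++ ')' :: (v.takeWhile (· ≠ '('))) ++
              '(' :: (v.dropWhile (· ≠ '(')).tail := by
            conv_lhs => rw [hu, hwsplit]
            exact cons_assoc1 _ _ _ _
          have hnl : '(' ∉ (u.takeWhile (fun c => !isParen c)) ++ ')' :: (v.takeWhile (· ≠ '(')) := by
            intro hm
            rcases List.mem_append.mp hm with h3 | h3
            · exact hqo h3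
            · rcases List.mem_cons.mp h3 with h3 | h3
              · exact absurd h3 (by decide)
              · exact hw1 h3
          have hl2 := find_of_split hu4 hnl
          rw [hl2] at h2
          push_cast [List.length_append, List.length_cons] at h2
          omega
        · rw [find_none hlm] at h1
          exact absurd h1 (by decide)
      rw [if_neg hcond, hinner, if_neg (by decide)]

-- the scanner crosses a semicolon-free chunk in dead state without effect
theorem scan_dead (t : List Char) (h : ';' ∉ t) (rest : List Char) (acc : Option (List Char))
    (out : PySem.Set String) :
    pfamScan (t ++ rest) acc true out = pfamScan rest acc true out := by
  induction t with
  | nil => rfl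
  | cons c t' ih =>
    have hc : ¬ c = ';' := fun hh => h (by simp [hh])
    rw [List.cons_append]
    simp only [pfamScan, hc, Bool.false_eq_true, if_false, if_true, ite_true, ite_false]
    exact ih (fun hm => h (List.mem_cons_of_mem _ hm))

-- the scanner in capture state across a semicolon-free chunk
theorem scan_cap (t : List Char) (h : ';' ∉ t) (rest buf : List Char) (out : PySem.Set String) :
    pfamScan (t ++ rest) (some buf) false out =
      if ')' ∈ t then pfamScan rest none true (finish out (buf ++ t.takeWhile (· ≠ ')')))
      else pfamScan rest (some (buf ++ t)) false out := by
  induction t generalizing buf with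
  | nil => simp
  | cons c t' ih =>
    have hc : ¬ c = ';' := fun hh => h (by simp [hh])
    have h' : ';' ∉ t' := fun hm => h (List.mem_cons_of_mem _ hm)
    rw [List.cons_append]
    by_cases hcp : c = ')'
    · subst hcp
      simp only [pfamScan, hc, Bool.false_eq_true, if_false, ite_false]
      rw [scan_dead t' h' rest none]
      rw [if_pos (List.mem_cons_self)]
      have ht : (')' :: t').takeWhile (· ≠ ')') = [] := by
        rw [List.takeWhile_cons, if_neg (by simp)]
      rw [ht, List.append_nil]
      rfl
    · simp only [pfamScan, hc, hcp, Bool.false_eq_true, if_false, ite_false]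
      rw [ih h' (buf ++ [c])]
      by_cases hr : ')' ∈ t'
      · rw [if_pos hr, if_pos (List.mem_cons_of_mem _ hr)]
        have ht : (c :: t').takeWhile (· ≠ ')') = c :: t'.takeWhile (· ≠ ')') := by
          rw [List.takeWhile_cons, if_pos (by simp [hcp])]
        rw [ht, List.append_assoc, List.singleton_append]
      · rw [if_neg hr, if_neg (by
          intro hm
          rcases List.mem_cons.mp hm with h1 | h1
          · exact hcp h1.symm
          · exact hr h1)]
        rw [List.append_assoc, List.singleton_append]

-- one full token followed by ';'
theorem scan_tok (t : List Char) (h : ';' ∉ t) (r : List Char) (out : PySem.Set String) :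
    pfamScan (t ++ ';' :: r) none false out = pfamScan r none false (tokO out t) := by
  induction t with
  | nil =>
    rw [List.nil_append]
    simp only [pfamScan, ite_true]
    rfl
  | cons c t' ih =>
    have hc : ¬ c = ';' := fun hh => h (by simp [hh])
    have h' : ';' ∉ t' := fun hm => h (List.mem_cons_of_mem _ hm)
    rw [List.cons_append]
    by_cases hc1 : c = '('
    · subst hc1
      simp only [pfamScan, hc, Bool.false_eq_true, if_false, ite_false, ite_true]
      rw [scan_cap t' h' (';' :: r) [] out]
      rw [tokO, inner?_cons_open]
      by_cases hr : ')' ∈ t'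
      · rw [if_pos hr, if_pos hr, List.nil_append]
        simp only [pfamScan, ite_true]
      · rw [if_neg hr, if_neg hr]
        simp only [pfamScan, ite_true]
    · by_cases hc2 : c = ')'
      · subst hc2
        simp only [pfamScan, hc, hc1, Bool.false_eq_true, if_false, ite_false]
        rw [scan_dead t' h' (';' :: r) none]
        simp only [pfamScan, ite_true]
        rw [tokO, inner?_cons_close]
      · simp only [pfamScan, hc, hc1, hc2, Bool.false_eq_true, if_false, ite_false]
        rw [ih h']
        have hp : isParen c = false := by
          rw [isParen]
          simp [hc1, hc2]
        rw [tokO, tokO, inner?_cons_skip hp]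

-- the last token (end of input)
theorem scan_last (t : List Char) (h : ';' ∉ t) (out : PySem.Set String) :
    pfamScan t none false out = tokO out t := by
  induction t with
  | nil => rfl
  | cons c t' ih =>
    have hc : ¬ c = ';' := fun hh => h (by simp [hh])
    have h' : ';' ∉ t' := fun hm => h (List.mem_cons_of_mem _ hm)
    by_cases hc1 : c = '('
    · subst hc1
      simp only [pfamScan, hc, Bool.false_eq_true, if_false, ite_false]
      have hcap := scan_cap t' h' [] [] out
      rw [List.append_nil] at hcap
      rw [hcap, tokO, inner?_cons_open]
      by_cases hr : ')' ∈ t'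
      · rw [if_pos hr, if_pos hr, List.nil_append]
        rfl
      · rw [if_neg hr, if_neg hr]
        rfl
    · by_cases hc2 : c = ')'
      · subst hc2
        simp only [pfamScan, hc, hc1, Bool.false_eq_true, if_false, ite_false]
        have hdd := scan_dead t' h' [] none out
        rw [List.append_nil] at hdd
        rw [hdd, tokO, inner?_cons_close]
        rfl
      · simp only [pfamScan, hc, hc1, hc2, Bool.false_eq_true, if_false, ite_false]
        rw [ih h']
        have hp : isParen c = false := by
          rw [isParen]
          simp [hc1, hc2]
        rw [tokO, tokO, inner?_cons_skip hp]

theorem splitSemi_no_semi (cs : List Char) (h : ';' ∉ cs) : splitSemi cs = [cs] := by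
  induction cs with
  | nil => rfl
  | cons c rest ih =>
    have hc : ¬ c = ';' := fun hh => h (by simp [hh])
    have h' : ';' ∉ rest := fun hm => h (List.mem_cons_of_mem _ hm)
    rw [splitSemi, if_neg hc, ih h']

theorem splitSemi_append (t : List Char) (h : ';' ∉ t) (r : List Char) :
    splitSemi (t ++ ';' :: r) = t :: splitSemi r := by
  induction t with
  | nil =>
    rw [List.nil_append, splitSemi, if_pos rfl]
  | cons c t' ih =>
    have hc : ¬ c = ';' := fun hh => h (by simp [hh])
    have h' : ';' ∉ t' := fun hm => h (List.mem_cons_of_mem _ hm)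
    rw [List.cons_append, splitSemi, if_neg hc, ih h']

theorem scan_eq_foldl_aux : ∀ (n : Nat) (cs : List Char) (out : PySem.Set String),
    cs.length ≤ n → pfamScan cs none false out = (splitSemi cs).foldl tokO out := by
  intro n
  induction n with
  | zero =>
    intro cs out hl
    cases cs with
    | nil => rfl
    | cons a b => simp at hl
  | succ n ih =>
    intro cs out hl
    by_cases h : ';' ∈ cs
    · obtain ⟨hsplit, hnot⟩ := split_at_first h
      have hlen : cs.length = (cs.takeWhile (· ≠ ';')).length + 1 +
          ((cs.dropWhile (· ≠ ';')).tail).length := by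
        conv_lhs => rw [hsplit]
        simp [List.length_append]
        omega
      conv_lhs => rw [hsplit]
      conv_rhs => rw [hsplit]
      rw [scan_tok _ hnot, splitSemi_append _ hnot, List.foldl_cons]
      exact ih _ _ (by omega)
    · rw [splitSemi_no_semi cs h, List.foldl_cons, List.foldl_nil]
      exact scan_last cs h out

theorem scan_eq_foldl (cs : List Char) (out : PySem.Set String) :
    pfamScan cs none false out = (splitSemi cs).foldl tokO out :=
  scan_eq_foldl_aux cs.length cs out le_rfl

theorem go_eq (fuel : Nat) : ∀ (l cur acc : List Char) (accs : List (List Char)),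
    l.length < fuel →
    PySem.Chars.splitOn.go [';'] fuel l cur accs = accs.reverse ++ headCons cur.reverse (splitSemi l) := by
  induction fuel with
  | zero => intro l cur acc accs h; omega
  | succ n ih =>
    intro l cur acc accs h
    cases l with
    | nil =>
      show (cur.reverse :: accs).reverse = _
      simp [splitSemi, headCons]
    | cons c rest =>
      rw [PySem.Chars.splitOn.go]
      by_cases hc : c = ';'
      · subst hc
        rw [if_pos (by simp [List.isPrefixOf])]
        rw [show List.drop [';'].length (';' :: rest) = rest from rfl]
        rw [ih rest [] acc (cur.reverse :: accs) (by simp at h ⊢; omega)]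
        rw [splitSemi, if_pos rfl]
        rw [List.reverse_nil, headCons_nil (splitSemi_ne_nil rest)]
        simp [headCons, List.reverse_cons, List.append_assoc]
      · rw [if_neg (by simp [List.isPrefixOf, hc]; intro hh; exact hc hh.symm)]
        rw [ih rest (c :: cur) acc accs (by simp at h ⊢; omega)]
        rcases hss : splitSemi rest with _ | ⟨t, ts⟩
        · exact absurd hss (splitSemi_ne_nil rest)
        · rw [splitSemi, if_neg hc, hss]
          simp [headCons, List.reverse_cons, List.append_assoc]

theorem splitOn_semi (cs : List Char) : PySem.Chars.splitOn cs [';'] = splitSemi cs := by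
  rw [PySem.Chars.splitOn]
  rw [go_eq (cs.length + 1) cs [] [] [] (by omega)]
  rw [show ([] : List Char).reverse = [] from rfl]
  rw [headCons_nil (splitSemi_ne_nil cs)]
  rfl

-- A's per-token step equals tokO
theorem stepA_eq_tokO (out : PySem.Set String) (t : List Char) :
    (if 0 ≤ PySem.Chars.find (PySem.Chars.strip t) ['('] ∧
        PySem.Chars.find (PySem.Chars.strip t) ['('] < PySem.Chars.find (PySem.Chars.strip t) [')'] then
       finish out (PySem.List.slice (PySem.Chars.strip t)
         (some (PySem.Chars.find (PySem.Chars.strip t) ['('] + 1))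
         (some (PySem.Chars.find (PySem.Chars.strip t) [')'])))
     else out) = tokO out t := by
  rw [tokO, ← inner?_strip t, ← innerA_eq (PySem.Chars.strip t)]
  by_cases hc : 0 ≤ PySem.Chars.find (PySem.Chars.strip t) ['('] ∧
      PySem.Chars.find (PySem.Chars.strip t) ['('] < PySem.Chars.find (PySem.Chars.strip t) [')']
  · rw [if_pos hc, if_pos hc]
  · rw [if_neg hc, if_neg hc]

-- ===== VERDICT (by name: the statement is the Claim_ definition above) =====
theorem extract_pfam_set_spec : Claim_equal_extract_pfam_set := by
  intro da _
  show extract_pfam_set da = extract_pfam_set_alt da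
  simp only [extract_pfam_set, extract_pfam_set_alt]
  by_cases h : da.toList = [] ∨ da.toList = ['N', 'A']
  · rw [if_pos h]
    rcases h with h | h <;> rw [h] <;> rfl
  · rw [if_neg h, splitOn_semi]
    refine (PySem.List.foldl_congr_mem _ _ _ _ ?_).trans (scan_eq_foldl da.toList PySem.Set.empty).symm
    intro acc x _
    exact stepA_eq_tokO acc x
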